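-- pv_equiv track=rewrite | github.com/AlexandrKhmil/playground | playground_py/recover_a_secret_string_from_random_triplets.py | check
-- ===== SOURCE A (Python) =====
-- def check(letter, triplets, secret):
--     for triplet in triplets:
--         if (letter in triplet
--             and (
--                 (triplet.index(letter) == 1 and triplet[0] not in secret)
--                     or triplet.index(letter) == 2 and (triplet[0] not in secret or triplet[1] not in secret)
--             )
--         ):
--             return False
--     return True
-- ===== SOURCE B (Python) =====
-- def check(letter, triplets, secret):
--     # Stage 1: collect every character that must already be known for `letter`
--     # to be a valid next secret character (the chars before letter's first
--     # occurrence when that occurrence is at position 1 or 2).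
--     # Stage 2: a single subset test against `secret` decides the answer.
--     required = set()
--     for t in triplets:
--         if letter in t:
--             i = t.index(letter)
--             if 1 <= i <= 2:
--                 required.update(t[:i])
--     return required.issubset(secret)
-- ===== Notes on version B (the rewrite author's own statement) =====
-- stated objective: alternative
-- what changed: Replaces A's single pass with early return and per-triplet membership tests against secret by two stages: first collect into a set all characters required before the letter (positions before its first occurrence at index 1 or 2), then decide with one subset test required <= secret.
import Mathlib
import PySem

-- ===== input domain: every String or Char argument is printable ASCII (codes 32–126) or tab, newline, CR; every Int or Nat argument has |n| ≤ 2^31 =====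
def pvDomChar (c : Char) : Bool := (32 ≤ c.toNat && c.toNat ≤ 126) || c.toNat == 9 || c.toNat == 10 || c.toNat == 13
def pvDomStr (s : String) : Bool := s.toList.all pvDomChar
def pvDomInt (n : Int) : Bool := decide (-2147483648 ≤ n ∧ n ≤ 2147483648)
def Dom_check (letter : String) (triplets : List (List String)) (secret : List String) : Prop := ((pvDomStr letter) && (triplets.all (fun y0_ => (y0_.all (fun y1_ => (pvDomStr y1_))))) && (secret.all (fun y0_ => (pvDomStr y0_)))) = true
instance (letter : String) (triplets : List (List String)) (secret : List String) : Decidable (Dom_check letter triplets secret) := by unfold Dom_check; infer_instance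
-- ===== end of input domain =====

-- B replaces A's early-return scan with membership tests per triplet by two stages:
-- collect the set of characters required before the letter, then one subset test.

-- ===== PORT A =====
-- loop body: the pyGetD defaults are never used — 'index? t letter = some 1/2' forces t.length ≥ 2/3
def checkGoA (letter : String) (secret : List String) : List (List String) → Bool
  | [] => true
  | t :: ts =>
    if t.contains letter &&
        ((PySem.List.index? t letter == some 1
            && !(secret.contains (PySem.List.pyGetD t 0 "")))
         || (PySem.List.index? t letter == some 2
            && (!(secret.contains (PySem.List.pyGetD t 0 ""))
                || !(secret.contains (PySem.List.pyGetD t 1 "")))))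
    then false
    else checkGoA letter secret ts

def check (letter : String) (triplets : List (List String)) (secret : List String) : Bool :=
  checkGoA letter secret triplets

-- ===== PORT B =====
-- stage 1 of Source B: 'required.update(t[:i])' for each triplet whose first occurrence
-- of letter is at index 1 or 2 ('i = t.index(letter)' is guarded by 'letter in t')
def collectGo (letter : String) : PySem.Set String → List (List String) → PySem.Set String
  | acc, [] => acc
  | acc, t :: ts =>
    if t.contains letter then
      let i := (PySem.List.index? t letter).getD 0
      if 1 ≤ i ∧ i ≤ 2 then collectGo letter (PySem.Set.update acc (t.take i)) ts
      else collectGo letter acc ts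
    else collectGo letter acc ts

-- stage 2 of Source B: 'required.issubset(secret)'
def check_alt (letter : String) (triplets : List (List String)) (secret : List String) : Bool :=
  PySem.Set.issubset (collectGo letter PySem.Set.empty triplets) secret

-- ===== PRECONDITION & SPEC =====
def Spec_check (letter : String) (triplets : List (List String)) (secret : List String) (out : Bool) : Prop := out = check_alt letter triplets secret
instance (letter : String) (triplets : List (List String)) (secret : List String) (out : Bool) : Decidable (Spec_check letter triplets secret out) := by unfold Spec_check; infer_instance

-- ===== CLAIM (what is proved, stated in full; the proofs are below) =====
def Claim_equal_check : Prop := ∀ (letter : String) (triplets : List (List String)) (secret : List String), Dom_check letter triplets secret → Spec_check letter triplets secret (check letter triplets secret)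

-- ===== LEMMAS AND PROOFS =====

theorem issubset_update (acc : PySem.Set String) (l secret : List String) :
    PySem.Set.issubset (PySem.Set.update acc l) secret
      = (PySem.Set.issubset acc secret && l.all (fun c => secret.contains c)) := by
  rw [Bool.eq_iff_iff]
  simp only [Bool.and_eq_true, PySem.Set.issubset_iff, PySem.Set.mem_update,
    List.all_eq_true, List.contains_iff_mem]
  constructor
  · intro h
    exact ⟨fun x hx => h x (Or.inl hx), fun x hx => h x (Or.inr hx)⟩
  · rintro ⟨h1, h2⟩ x (hx | hx)
    · exact h1 x hx
    · exact h2 x hx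

-- A's hardcoded index==1/2 disjunction equals "some char of t.take k is not in secret" (k the first index)
theorem stepA_eq (secret : List String) (t : List String) (k : Nat)
    (hk : PySem.List.index? t (letter : String) = some k) :
    (t.contains letter &&
        ((PySem.List.index? t letter == some 1
            && !(secret.contains (PySem.List.pyGetD t 0 "")))
         || (PySem.List.index? t letter == some 2
            && (!(secret.contains (PySem.List.pyGetD t 0 ""))
                || !(secret.contains (PySem.List.pyGetD t 1 ""))))))
    = (decide (1 ≤ k ∧ k ≤ 2) && !((t.take k).all (fun c => secret.contains c))) := by
  have hm : letter ∈ t := (PySem.List.index?_isSome_iff t letter).mp (by rw [hk]; rfl)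
  obtain ⟨hlen, _, _⟩ := PySem.List.getElem_of_index?_eq_some hk
  rw [hk]
  match k, hlen with
  | 0, _ => simp
  | 1, hlen =>
    match t, hlen with
    | a :: r, _ => simp [hm, PySem.List.pyGetD_zero_cons, List.take]
  | 2, hlen =>
    match t, hlen with
    | a :: b :: r, _ =>
      rw [PySem.List.pyGetD_ofNat' (xs := a :: b :: r) (k := 1) (d := "")]
      simp [hm, PySem.List.pyGetD_zero_cons, List.take, Bool.and_comm]
  | (n+3), _ => simp

theorem go_eq (letter : String) (secret : List String) (ts : List (List String)) :
    ∀ acc, PySem.Set.issubset (collectGo letter acc ts) secret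
      = (PySem.Set.issubset acc secret && checkGoA letter secret ts) := by
  induction ts with
  | nil => intro acc; simp [collectGo, checkGoA]
  | cons t ts ih =>
    intro acc
    by_cases hm : letter ∈ t
    · obtain ⟨k, hk⟩ := Option.isSome_iff_exists.mp ((PySem.List.index?_isSome_iff t letter).mpr hm)
      have hc : t.contains letter = true := by simpa using hm
      rw [collectGo, checkGoA, stepA_eq secret t k hk]
      simp only [hc, if_true, hk, Option.getD_some]
      by_cases h12 : 1 ≤ k ∧ k ≤ 2
      · rw [if_pos h12, ih, issubset_update]
        have hd : decide (1 ≤ k ∧ k ≤ 2) = true := decide_eq_true h12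
        cases hall : (t.take k).all (fun c => secret.contains c)
        · simp [hd]
        · simp [hd]
      · rw [if_neg h12, ih]
        have hd : decide (1 ≤ k ∧ k ≤ 2) = false := decide_eq_false h12
        simp [hd]
    · rw [collectGo, checkGoA]
      simp [hm, ih]

-- ===== VERDICT (by name: the statement is the Claim_ definition above) =====
theorem check_spec : Claim_equal_check := by
  intro letter triplets secret _
  unfold Spec_check check check_alt
  rw [go_eq]
  simp [PySem.Set.issubset_iff, PySem.Set.empty]
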